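-- pv_equiv track=rewrite | github.com/pangzhan27/CMeRT | src/rekognition_online_action_detection/evaluation/new_metrics.py | get_labels_start_end_time
-- ===== SOURCE A (Python) =====
-- def get_labels_start_end_time(frame_wise_labels, bg_class=[0]):
--     labels = []
--     starts = []
--     ends = []
--     last_label = frame_wise_labels[0]
--     if frame_wise_labels[0] not in bg_class:
--         labels.append(frame_wise_labels[0])
--         starts.append(0)
--     for i in range(len(frame_wise_labels)):
--         if frame_wise_labels[i] != last_label:
--             if frame_wise_labels[i] not in bg_class:
--                 labels.append(frame_wise_labels[i])
--                 starts.append(i)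
--             if last_label not in bg_class:
--                 ends.append(i)
--             last_label = frame_wise_labels[i]
--     if last_label not in bg_class:
--         ends.append(i+1)
--     return labels, starts, ends
-- ===== SOURCE B (Python) =====
-- def get_labels_start_end_time(frame_wise_labels, bg_class=[0]):
--     # Phase 1: build maximal runs (value, start, end) of equal consecutive labels.
--     runs = []
--     for i, v in enumerate(frame_wise_labels):
--         if runs and runs[-1][0] == v:
--             runs[-1][2] = i + 1
--         else:
--             runs.append([v, i, i + 1])
--     # Phase 2: keep non-background runs and split into three lists.
--     keep = [run for run in runs if run[0] not in bg_class]
--     labels = [v for v, s, e in keep]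
--     starts = [s for v, s, e in keep]
--     ends = [e for v, s, e in keep]
--     return labels, starts, ends
-- ===== Notes on version B (the rewrite author's own statement) =====
-- stated objective: alternative
-- what changed: B first builds the list of maximal runs (value, start, end) in one enumerate pass, then filters out background runs and projects the three lists, instead of A's single pass that tracks last_label transitions and appends to three lists at different moments.
import Mathlib
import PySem

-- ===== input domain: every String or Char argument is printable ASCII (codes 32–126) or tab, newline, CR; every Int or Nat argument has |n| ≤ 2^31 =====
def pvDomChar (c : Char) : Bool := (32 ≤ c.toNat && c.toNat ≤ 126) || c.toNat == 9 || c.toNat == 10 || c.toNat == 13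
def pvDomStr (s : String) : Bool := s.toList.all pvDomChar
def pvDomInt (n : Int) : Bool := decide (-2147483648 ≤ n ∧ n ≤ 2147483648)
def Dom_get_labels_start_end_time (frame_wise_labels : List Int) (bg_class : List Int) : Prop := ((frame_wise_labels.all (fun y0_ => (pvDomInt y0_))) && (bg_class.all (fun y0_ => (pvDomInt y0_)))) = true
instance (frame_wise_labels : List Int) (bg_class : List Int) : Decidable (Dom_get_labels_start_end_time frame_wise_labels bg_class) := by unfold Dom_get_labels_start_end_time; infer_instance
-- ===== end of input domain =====

-- B re-decomposes A's single transition-tracking pass into run-building followed by a background filter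
-- (objective: alternative structure, same O(n) cost); the equivalence is about return values on nonempty input.

-- ===== PORT A =====
-- one iteration of A's loop; state = (labels, starts, ends, last_label), p = (frame_wise_labels[i], i)
def glsetStepA (bg : List Int) (st : List Int × List Int × List Int × Int) (p : Int × Nat) :
    List Int × List Int × List Int × Int :=
  if p.1 ≠ st.2.2.2 then
    ((if bg.contains p.1 then st.1 else st.1 ++ [p.1]),
     (if bg.contains p.1 then st.2.1 else st.2.1 ++ [(p.2 : Int)]),
     (if bg.contains st.2.2.2 then st.2.2.1 else st.2.2.1 ++ [(p.2 : Int)]),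
     p.1)
  else st

def get_labels_start_end_time (frame_wise_labels : List Int) (bg_class : List Int) : List Int × List Int × List Int :=
  match frame_wise_labels with
  | [] => ([], [], [])  -- Python raises IndexError at frame_wise_labels[0]; excluded by Pre_
  | x0 :: _ =>
    let labels0 : List Int := if bg_class.contains x0 then [] else [x0]
    let starts0 : List Int := if bg_class.contains x0 then [] else [0]
    let st := (frame_wise_labels.zipIdx).foldl (glsetStepA bg_class) (labels0, starts0, [], x0)
    -- after the loop i = len-1, so Python's trailing i+1 is the list length (nonempty here)
    let ends := if bg_class.contains st.2.2.2 then st.2.2.1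
                else st.2.2.1 ++ [(frame_wise_labels.length : Int)]
    (st.1, st.2.1, ends)

-- ===== PORT B =====
-- one iteration of B's run-building loop: extend the last run or open a new one; p = (v, i)
def glsetStepB (runs : List (Int × Int × Int)) (p : Int × Nat) : List (Int × Int × Int) :=
  match runs.getLast? with
  | some r => if r.1 = p.1 then runs.dropLast ++ [(r.1, r.2.1, (p.2 : Int) + 1)]
              else runs ++ [(p.1, (p.2 : Int), (p.2 : Int) + 1)]
  | none => [(p.1, (p.2 : Int), (p.2 : Int) + 1)]

def get_labels_start_end_time_alt (frame_wise_labels : List Int) (bg_class : List Int) : List Int × List Int × List Int :=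
  let runs := (frame_wise_labels.zipIdx).foldl glsetStepB []
  let keep := runs.filter (fun r => !(bg_class.contains r.1))
  (keep.map (fun r => r.1), keep.map (fun r => r.2.1), keep.map (fun r => r.2.2))

-- ===== PRECONDITION & SPEC =====
-- Pre_ excludes only the empty frame list, on which Python A raises IndexError.
def Pre_get_labels_start_end_time (frame_wise_labels : List Int) (bg_class : List Int) : Prop :=
  frame_wise_labels ≠ []
instance (frame_wise_labels : List Int) (bg_class : List Int) : Decidable (Pre_get_labels_start_end_time frame_wise_labels bg_class) := by unfold Pre_get_labels_start_end_time; infer_instance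

def pvWitness_get_labels_start_end_time : List Int × List Int := ([1, 1, 0, 2], [0])

def Spec_get_labels_start_end_time (frame_wise_labels : List Int) (bg_class : List Int) (out : List Int × List Int × List Int) : Prop := out = get_labels_start_end_time_alt frame_wise_labels bg_class
instance (frame_wise_labels : List Int) (bg_class : List Int) (out : List Int × List Int × List Int) : Decidable (Spec_get_labels_start_end_time frame_wise_labels bg_class out) := by unfold Spec_get_labels_start_end_time; infer_instance

-- ===== CLAIM (what is proved, stated in full; the proofs are below) =====
def Claim_equal_get_labels_start_end_time : Prop := ∀ (frame_wise_labels : List Int) (bg_class : List Int), Dom_get_labels_start_end_time frame_wise_labels bg_class → Pre_get_labels_start_end_time frame_wise_labels bg_class → Spec_get_labels_start_end_time frame_wise_labels bg_class (get_labels_start_end_time frame_wise_labels bg_class)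


-- ===== LEMMAS AND PROOFS =====

-- replacing the last run by one with the same label and start leaves the filtered label/start projections unchanged
lemma glset_filter_map_concat {β : Type} (l : List (Int × Int × Int)) (f : Int × Int × Int → Bool)
    (g : Int × Int × Int → β) (a b : Int × Int × Int)
    (hf : f a = f b) (hg : g a = g b) :
    ((l ++ [a]).filter f).map g = ((l ++ [b]).filter f).map g := by
  rw [List.filter_append, List.filter_append, List.map_append, List.map_append]
  congr 1
  cases hfa : f a <;> simp [List.filter, hfa, ← hf, hg]

-- loop invariant: B's run list determines A's loop state throughout the fold
lemma glset_inv (bg : List Int) (xs : List Int) :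
    ∀ (k : Nat) (runs : List (Int × Int × Int)) (r : Int × Int × Int),
    r.2.2 = (k : Int) →
    ∃ runs' r',
      (xs.zipIdx k).foldl glsetStepB (runs ++ [r]) = runs' ++ [r'] ∧
      (xs.zipIdx k).foldl (glsetStepA bg)
        ( ((runs ++ [r]).filter (fun q => !(bg.contains q.1))).map (fun q => q.1),
          ((runs ++ [r]).filter (fun q => !(bg.contains q.1))).map (fun q => q.2.1),
          (runs.filter (fun q => !(bg.contains q.1))).map (fun q => q.2.2),
          r.1 ) =
        ( ((runs' ++ [r']).filter (fun q => !(bg.contains q.1))).map (fun q => q.1),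
          ((runs' ++ [r']).filter (fun q => !(bg.contains q.1))).map (fun q => q.2.1),
          (runs'.filter (fun q => !(bg.contains q.1))).map (fun q => q.2.2),
          r'.1 ) ∧
      r'.2.2 = ((k + xs.length : Nat) : Int) := by
  induction xs with
  | nil =>
    intro k runs r hr
    exact ⟨runs, r, rfl, rfl, by simpa using hr⟩
  | cons v rest ih =>
    intro k runs r hr
    rw [List.zipIdx_cons]
    simp only [List.foldl_cons]
    by_cases hv : r.1 = v
    · -- same label: B extends the last run in place, A's state is unchanged
      have hB : glsetStepB (runs ++ [r]) (v, k) = runs ++ [(r.1, r.2.1, (k : Int) + 1)] := by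
        simp [glsetStepB, hv]
      have hA : glsetStepA bg
          ( ((runs ++ [r]).filter (fun q => !(bg.contains q.1))).map (fun q => q.1),
            ((runs ++ [r]).filter (fun q => !(bg.contains q.1))).map (fun q => q.2.1),
            (runs.filter (fun q => !(bg.contains q.1))).map (fun q => q.2.2),
            r.1 ) (v, k) =
          ( ((runs ++ [r]).filter (fun q => !(bg.contains q.1))).map (fun q => q.1),
            ((runs ++ [r]).filter (fun q => !(bg.contains q.1))).map (fun q => q.2.1),
            (runs.filter (fun q => !(bg.contains q.1))).map (fun q => q.2.2),
            r.1 ) := by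
        simp [glsetStepA, hv]
      rw [hB, hA]
      obtain ⟨runs', r', h1, h2, h3⟩ := ih (k + 1) runs (r.1, r.2.1, (k : Int) + 1) (by push_cast; ring)
      refine ⟨runs', r', h1, ?_, by simpa [Nat.add_assoc, Nat.add_comm 1 rest.length] using h3⟩
      have e1 := glset_filter_map_concat (β := Int) runs (fun q => !(bg.contains q.1))
        (fun q => q.1) r (r.1, r.2.1, (k : Int) + 1) rfl rfl
      have e2 := glset_filter_map_concat (β := Int) runs (fun q => !(bg.contains q.1))
        (fun q => q.2.1) r (r.1, r.2.1, (k : Int) + 1) rfl rfl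
      rw [e1, e2]
      exact h2
    · -- new label: B opens a new run, A records the transition
      have hB : glsetStepB (runs ++ [r]) (v, k) =
          (runs ++ [r]) ++ [(v, (k : Int), (k : Int) + 1)] := by
        simp [glsetStepB, hv]
      have hA : glsetStepA bg
          ( ((runs ++ [r]).filter (fun q => !(bg.contains q.1))).map (fun q => q.1),
            ((runs ++ [r]).filter (fun q => !(bg.contains q.1))).map (fun q => q.2.1),
            (runs.filter (fun q => !(bg.contains q.1))).map (fun q => q.2.2),
            r.1 ) (v, k) =
          ( (((runs ++ [r]) ++ [(v, (k : Int), (k : Int) + 1)]).filter (fun q => !(bg.contains q.1))).map (fun q => q.1),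
            (((runs ++ [r]) ++ [(v, (k : Int), (k : Int) + 1)]).filter (fun q => !(bg.contains q.1))).map (fun q => q.2.1),
            (((runs ++ [r])).filter (fun q => !(bg.contains q.1))).map (fun q => q.2.2),
            v ) := by
        have hne : v ≠ r.1 := fun h => hv h.symm
        simp only [glsetStepA, List.filter_append, List.map_append]
        by_cases hcv : v ∈ bg <;> by_cases hcr : r.1 ∈ bg <;>
          simp [hne, hcv, hcr, List.filter, hr, List.contains_eq_mem]
      rw [hB, hA]
      obtain ⟨runs', r', h1, h2, h3⟩ :=
        ih (k + 1) (runs ++ [r]) (v, (k : Int), (k : Int) + 1) (by push_cast; ring)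
      exact ⟨runs', r', h1, h2, by simpa [Nat.add_assoc, Nat.add_comm 1 rest.length] using h3⟩

-- ===== VERDICT (by name: the statement is the Claim_ definition above) =====
theorem get_labels_start_end_time_spec : Claim_equal_get_labels_start_end_time := by
  intro fw bg _ hpre
  unfold Spec_get_labels_start_end_time
  match fw, hpre with
  | x0 :: rest, _ =>
    unfold get_labels_start_end_time get_labels_start_end_time_alt
    simp only [List.zipIdx_cons, List.foldl_cons]
    have hB0 : glsetStepB [] (x0, 0) = [] ++ [(x0, (0 : Int), (0 : Int) + 1)] := by
      simp [glsetStepB]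
    have hA0 : glsetStepA bg
        ((if bg.contains x0 then [] else [x0]),
         (if bg.contains x0 then ([] : List Int) else [0]), ([] : List Int), x0) ((x0, 0) : Int × Nat) =
        ((if bg.contains x0 then [] else [x0]),
         (if bg.contains x0 then ([] : List Int) else [0]), ([] : List Int), x0) := by
      simp [glsetStepA]
    rw [hB0, hA0]
    obtain ⟨runs', r', h1, h2, h3⟩ := glset_inv bg rest 1 [] (x0, (0 : Int), (0 : Int) + 1) (by norm_num)
    have hinit :
        ((if bg.contains x0 then [] else [x0]),
         (if bg.contains x0 then ([] : List Int) else [0]), ([] : List Int), x0) =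
        (((([] : List (Int × Int × Int)) ++ [(x0, (0 : Int), (0 : Int) + 1)]).filter (fun q => !(bg.contains q.1))).map (fun q => q.1),
         ((([] : List (Int × Int × Int)) ++ [(x0, (0 : Int), (0 : Int) + 1)]).filter (fun q => !(bg.contains q.1))).map (fun q => q.2.1),
         (([] : List (Int × Int × Int)).filter (fun q => !(bg.contains q.1))).map (fun q => q.2.2),
         (x0, (0 : Int), (0 : Int) + 1).1) := by
      by_cases hc : x0 ∈ bg <;> simp [List.filter, List.contains_eq_mem, hc]
    rw [hinit, h1, h2]
    simp only
    refine Prod.ext rfl (Prod.ext rfl ?_)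
    have hend : r'.2.2 = (((x0 :: rest).length : Nat) : Int) := by
      simpa [List.length_cons, Nat.add_comm] using h3
    by_cases hcr : r'.1 ∈ bg
    · simp [List.filter_append, List.map_append, List.filter, List.contains_eq_mem, hcr]
    · simp only [List.filter_append, List.map_append, List.contains_eq_mem]
      simp [List.filter, List.contains_eq_mem, hcr, hend]
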